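-- pv_equiv track=rewrite | github.com/nattyleyo/Codeforce-A2SV-progress | C_Given_Length_and_Sum_of_Digits.py | find
-- ===== SOURCE A (Python) =====
-- def find(n, s):
--     if s == 0:
--         if n == 1:
--             return "0 0"
--         else:
--             return "-1 -1"
--
--     if s > 9 * n:
--         return "-1 -1"
--
--     mini = [0] * n
--     Sum = s
--
--     for i in range(n-1, -1, -1):
--         if Sum > 9:
--             mini[i] = 9
--             Sum -= 9
--         else:
--             mini[i] = Sum
--             Sum = 0
--
--     if mini[0] == 0:
--         for i in range(1, n):
--             if mini[i] > 0:
--                 mini[i] -= 1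
--                 mini[0] = 1
--                 break
--
--     maxi = [0] * n
--     Sum = s
--
--     for i in range(n):
--         if Sum > 9:
--             maxi[i] = 9
--             Sum -= 9
--         else:
--             maxi[i] = Sum
--             Sum = 0
--
--     return ''.join(map(str, mini)) + " " + ''.join(map(str, maxi))
-- ===== SOURCE B (Python) =====
-- def find(n, s):
--     # closed-form construction: smallest = max(1, s-9*(n-1)) then zeros/remainder/nines,
--     # largest = nines/remainder/zeros from divmod(s, 9); negative s is impossible -> "-1 -1"
--     if s == 0:
--         return "0 0" if n == 1 else "-1 -1"
--     if s < 0 or s > 9 * n: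
--         return "-1 -1"
--     q, r = divmod(s, 9)
--     big = "9" * q + (str(r) if r else "") + "0" * (n - q - (1 if r else 0))
--     d0 = max(1, s - 9 * (n - 1))
--     q2, r2 = divmod(s - d0, 9)
--     small = str(d0) + "0" * (n - 1 - q2 - (1 if r2 else 0)) + (str(r2) if r2 else "") + "9" * q2
--     return small + " " + big
-- ===== Notes on version B (the rewrite author's own statement) =====
-- stated objective: alternative
-- what changed: B replaces A's three in-place array loops (fill mini right-to-left with 9s, then a borrow pass fixing the leading zero, then fill maxi left-to-right) by a closed-form construction: both digit strings are built directly from divmod(s,9) and the forced first digit max(1, s-9*(n-1)) using string repetition, with no per-position loop or borrow pass.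
-- intended difference: For n >= 1 and s < 0 (except n=1, s=-1, where both return "-1 -1"), A falls through its guards and returns malformed strings whose 'digits' contain minus signs (e.g. find(2,-3) = "0-3 -30"); B returns "-1 -1", the intended answer since no number has a negative digit sum. — e.g. on find(2, -3): A returns "0-3 -30", B returns "-1 -1"
import Mathlib
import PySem

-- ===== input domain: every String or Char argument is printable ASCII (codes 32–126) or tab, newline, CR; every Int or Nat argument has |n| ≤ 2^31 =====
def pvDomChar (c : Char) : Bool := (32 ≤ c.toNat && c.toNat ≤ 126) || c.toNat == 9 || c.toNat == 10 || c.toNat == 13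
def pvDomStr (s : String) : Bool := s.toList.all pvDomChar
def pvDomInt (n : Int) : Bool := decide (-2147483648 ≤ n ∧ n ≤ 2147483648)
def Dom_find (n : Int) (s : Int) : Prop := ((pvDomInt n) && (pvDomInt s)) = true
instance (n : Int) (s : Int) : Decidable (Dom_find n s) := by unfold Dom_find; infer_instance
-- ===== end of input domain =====

-- B builds both digit strings in closed form from divmod(s,9) and the forced first digit,
-- replacing A's right-to-left fill plus leading-zero borrow pass (alternative decomposition, same O(n) cost).


-- ===== PORT A =====
-- the body of A's two identical fill loops ('if Sum > 9: x[i]=9; Sum-=9 else: x[i]=Sum; Sum=0')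
def fillStep (st : List Int × Int) (i : Int) : List Int × Int :=
  if st.2 > 9 then (PySem.List.pySetD st.1 i 9, st.2 - 9)
  else (PySem.List.pySetD st.1 i st.2, 0)

-- the borrow loop 'for i in range(1,n): if mini[i]>0: mini[i]-=1; mini[0]=1; break', break as a done-flag
def borrowStep (st : List Int × Bool) (i : Int) : List Int × Bool :=
  if st.2 then st
  else if PySem.List.pyGetD st.1 i 0 > 0 then
    (PySem.List.pySetD (PySem.List.pySetD st.1 i (PySem.List.pyGetD st.1 i 0 - 1)) 0 1, true)
  else st

-- indexing uses pyGetD/pySetD with defaults: inside Pre_find every index Python touches is in range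
def find (n : Int) (s : Int) : String :=
  if s = 0 then
    (if n = 1 then "0 0" else "-1 -1")
  else if s > 9 * n then "-1 -1"
  else
    let mini0 := ((PySem.List.pyRange (n - 1) (-1) (-1)).foldl fillStep (List.replicate n.toNat 0, s)).1
    let mini :=
      if PySem.List.pyGetD mini0 0 0 = 0 then
        ((PySem.List.pyRange 1 n 1).foldl borrowStep (mini0, false)).1
      else mini0
    let maxi := ((PySem.List.pyRange 0 n 1).foldl fillStep (List.replicate n.toNat 0, s)).1
    String.ofList (PySem.Chars.join [] (mini.map PySem.Int.toChars) ++ " ".toList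
               ++ PySem.Chars.join [] (maxi.map PySem.Int.toChars))

-- ===== PORT B =====
def find_alt (n : Int) (s : Int) : String :=
  if s = 0 then
    (if n = 1 then "0 0" else "-1 -1")
  else if s < 0 ∨ s > 9 * n then "-1 -1"
  else
    let q := PySem.Int.floordiv s 9
    let r := PySem.Int.mod s 9
    let big := PySem.List.pyRepeat ['9'] q
      ++ (if r ≠ 0 then PySem.Int.toChars r else [])
      ++ PySem.List.pyRepeat ['0'] (n - q - (if r ≠ 0 then 1 else 0))
    let d0 := max 1 (s - 9 * (n - 1))
    let q2 := PySem.Int.floordiv (s - d0) 9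
    let r2 := PySem.Int.mod (s - d0) 9
    let small := PySem.Int.toChars d0
      ++ PySem.List.pyRepeat ['0'] (n - 1 - q2 - (if r2 ≠ 0 then 1 else 0))
      ++ (if r2 ≠ 0 then PySem.Int.toChars r2 else [])
      ++ PySem.List.pyRepeat ['9'] q2
    String.ofList (small ++ " ".toList ++ big)

-- ===== PRECONDITION & SPEC =====
-- Pre_ excludes exactly the inputs where A raises IndexError (n ≤ 0 with s ≠ 0 and s ≤ 9n: mini[0] of an empty list)
def Pre_find (n : Int) (s : Int) : Prop := ¬ (n ≤ 0 ∧ s ≠ 0 ∧ s ≤ 9 * n)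
instance (n : Int) (s : Int) : Decidable (Pre_find n s) := by unfold Pre_find; infer_instance
def pvWitness_find : Int × Int := (3, 10)

-- For n ≥ 1 and s < 0 (except n=1, s=-1, where both return "-1 -1"), A falls through its guards and returns
-- malformed strings whose 'digits' contain minus signs (e.g. find(2,-3) = "0-3 -30"); B returns "-1 -1",
-- the intended answer since no number has a negative digit sum.
def D_find (n : Int) (s : Int) : Prop := 1 ≤ n ∧ s < 0 ∧ ¬ (n = 1 ∧ s = -1)
instance (n : Int) (s : Int) : Decidable (D_find n s) := by unfold D_find; infer_instance

def Spec_find (n : Int) (s : Int) (out : String) : Prop := ¬ D_find n s → out = find_alt n s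
instance (n : Int) (s : Int) (out : String) : Decidable (Spec_find n s out) := by unfold Spec_find; infer_instance

def pvDiffWitness_find : Int × Int := (2, -3)
def pvDiffWitnessOut_find : String × String := ("0-3 -30", "-1 -1")

-- ===== CLAIM (what is proved, stated in full; the proofs are below) =====
def Claim_unchanged_find : Prop := ∀ (n : Int) (s : Int), Dom_find n s → Pre_find n s → Spec_find n s (find n s)
def Claim_changed_find : Prop := Dom_find (pvDiffWitness_find.1) (pvDiffWitness_find.2) ∧ Pre_find (pvDiffWitness_find.1) (pvDiffWitness_find.2) ∧ D_find (pvDiffWitness_find.1) (pvDiffWitness_find.2) ∧ find (pvDiffWitness_find.1) (pvDiffWitness_find.2) = pvDiffWitnessOut_find.1 ∧ find_alt (pvDiffWitness_find.1) (pvDiffWitness_find.2) = pvDiffWitnessOut_find.2 ∧ pvDiffWitnessOut_find.1 ≠ pvDiffWitnessOut_find.2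

-- ===== LEMMAS AND PROOFS =====

-- the value sequence written by A's fill loops: digit min(9, Sum) then recurse on the remainder
def gpair : Nat → Int → List Int × Int
  | 0, S => ([], S)
  | m+1, S =>
    let d := if S > 9 then 9 else S
    let p := gpair m (S - d)
    (d :: p.1, p.2)

lemma fillStep_eq (l : List Int) (S i : Int) :
    fillStep (l, S) i = (PySem.List.pySetD l i (if S > 9 then 9 else S), S - (if S > 9 then 9 else S)) := by
  unfold fillStep; split_ifs <;> simp

lemma mini_loop (m : Nat) (suf : List Int) (S : Int) :
    (PySem.List.pyRange ((m : Int) - 1) (-1) (-1)).foldl fillStep (List.replicate m 0 ++ suf, S)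
      = ((gpair m S).1.reverse ++ suf, (gpair m S).2) := by
  induction m generalizing suf S with
  | zero =>
    rw [show ((0 : Nat) : Int) - 1 = -1 by norm_num, PySem.List.pyRange_neg_one_eq_nil (by norm_num)]
    simp [gpair]
  | succ m ih =>
    rw [show ((m + 1 : Nat) : Int) - 1 = (m : Int) by push_cast; ring,
      PySem.List.pyRange_neg_one_cons (by omega)]
    simp only [List.foldl_cons, fillStep_eq, PySem.List.pySetD_natCast]
    have hset : (List.replicate (m + 1) (0 : Int) ++ suf).set m (if S > 9 then 9 else S)
        = List.replicate m 0 ++ ([if S > 9 then 9 else S] ++ suf) := by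
      rw [List.replicate_succ', List.append_assoc, List.set_append]
      simp
    rw [hset, ih]
    simp [gpair]

lemma maxi_loop (m : Nat) (pre : List Int) (S : Int) :
    (PySem.List.pyRange (pre.length : Int) ((pre.length : Int) + (m : Int)) 1).foldl fillStep
        (pre ++ List.replicate m 0, S)
      = (pre ++ (gpair m S).1, (gpair m S).2) := by
  induction m generalizing pre S with
  | zero =>
    rw [PySem.List.pyRange_one_eq_nil (by push_cast; omega)]
    simp [gpair]
  | succ m ih =>
    rw [PySem.List.pyRange_one_cons (by push_cast; omega)]
    simp only [List.foldl_cons, fillStep_eq, PySem.List.pySetD_natCast]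
    have hset : (pre ++ List.replicate (m + 1) (0 : Int)).set pre.length (if S > 9 then 9 else S)
        = (pre ++ [if S > 9 then 9 else S]) ++ List.replicate m 0 := by
      rw [List.set_append]
      simp [List.replicate_succ]
    have hrange : PySem.List.pyRange ((pre.length : Int) + 1) ((pre.length : Int) + ((m : Int) + 1)) 1
        = PySem.List.pyRange (((pre ++ [if S > 9 then 9 else S]).length : Int))
            (((pre ++ [if S > 9 then 9 else S]).length : Int) + (m : Int)) 1 := by
      congr 1
      · simp
      · simp; ring
    rw [hset]
    push_cast
    rw [hrange, ih]
    simp [gpair]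

lemma gpair_zero (m : Nat) : gpair m 0 = (List.replicate m 0, 0) := by
  induction m with
  | zero => rfl
  | succ k ih => simp [gpair, ih, List.replicate_succ]

lemma gpair_eq (m : Nat) (S : Int) (q r : Nat) (hS : S = 9 * q + r) (hr : r < 9) (h9 : S ≤ 9 * m) :
    (gpair m S).1 = List.replicate q 9 ++ (if r = 0 then [] else [(r : Int)])
      ++ List.replicate (m - q - (if r = 0 then 0 else 1)) 0 := by
  induction m generalizing S q r with
  | zero =>
    have hq : q = 0 ∧ r = 0 := by omega
    obtain ⟨rfl, rfl⟩ := hq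
    simp [gpair]
  | succ m ih =>
    by_cases hS9 : S > 9
    · have hq1 : 1 ≤ q := by omega
      obtain ⟨q', rfl⟩ : ∃ q', q = q' + 1 := ⟨q - 1, by omega⟩
      have hrec := ih (S - 9) q' r (by omega) hr (by push_cast at h9 ⊢; omega)
      simp only [gpair, if_pos hS9, hrec]
      have harith : m + 1 - (q' + 1) - (if r = 0 then 0 else 1) = m - q' - (if r = 0 then 0 else 1) := by
        omega
      rw [harith]
      simp [List.replicate_succ]
    · have hd : (if S > 9 then (9 : Int) else S) = S := if_neg hS9
      by_cases hr0 : r = 0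
      · subst hr0
        have hq01 : q = 0 ∨ q = 1 := by omega
        rcases hq01 with rfl | rfl
        · have hS0 : S = 0 := by omega
          subst hS0
          simp [gpair, gpair_zero, List.replicate_succ]
        · have hS9' : S = 9 := by omega
          subst hS9'
          simp [gpair, gpair_zero, List.replicate_succ]
      · have hq0 : q = 0 := by omega
        subst hq0
        have hSr : S = (r : Int) := by omega
        have h9r : ¬((r : Int) > 9) := by omega
        simp [gpair, hSr, h9r, gpair_zero, hr0]

lemma borrow_done (r : List Int) (l : List Int) :
    r.foldl borrowStep (l, true) = (l, true) := by
  induction r generalizing l with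
  | nil => rfl
  | cons a t ih => simp [borrowStep, ih]

lemma borrow_skip (L : List Int) (r : List Int)
    (h : ∀ i ∈ r, PySem.List.pyGetD L i 0 ≤ 0) :
    r.foldl borrowStep (L, false) = (L, false) := by
  induction r with
  | nil => rfl
  | cons a t ih =>
    have ha := h a (by simp)
    simp only [List.foldl_cons, borrowStep]
    rw [if_neg (by simp), if_neg (by omega)]
    exact ih (fun i hi => h i (by simp [hi]))

lemma borrow_main (z : Nat) (v : Int) (rest : List Int) (hz : 1 ≤ z) (hv : 0 < v) :
    ((PySem.List.pyRange 1 ((z : Int) + 1 + rest.length) 1).foldl borrowStep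
        (List.replicate z 0 ++ v :: rest, false)).1
      = 1 :: List.replicate (z - 1) 0 ++ (v - 1) :: rest := by
  obtain ⟨z', rfl⟩ : ∃ z', z = z' + 1 := ⟨z - 1, by omega⟩
  push_cast
  rw [PySem.List.pyRange_one_append 1 ((z' : Int) + 1) ((z' : Int) + 1 + 1 + rest.length)
      (by omega) (by omega), List.foldl_append]
  rw [borrow_skip _ _ ?side]
  case side =>
    intro i hi
    rw [PySem.List.mem_pyRange_one] at hi
    rw [PySem.List.pyGetD_eq_getElem _ 0 (by omega) (by simp; omega)]
    rw [List.getElem_append_left (by simp; omega)]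
    simp
  rw [PySem.List.pyRange_one_cons (by omega), List.foldl_cons]
  have hcast : ((z' : Int) + 1) = ((z' + 1 : Nat) : Int) := by push_cast; ring
  have hget : PySem.List.pyGetD (List.replicate (z' + 1) (0 : Int) ++ v :: rest) ((z' : Int) + 1) 0 = v := by
    rw [hcast, PySem.List.pyGetD_natCast, List.getD_eq_getElem?_getD,
      List.getElem?_append_right (by simp)]
    simp
  have hstep : borrowStep (List.replicate (z' + 1) (0 : Int) ++ v :: rest, false) ((z' : Int) + 1)
      = (1 :: List.replicate z' 0 ++ (v - 1) :: rest, true) := by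
    unfold borrowStep
    rw [if_neg (by simp), hget, if_pos hv]
    rw [hcast, PySem.List.pySetD_natCast]
    have hset1 : (List.replicate (z' + 1) (0 : Int) ++ v :: rest).set (z' + 1) (v - 1)
        = List.replicate (z' + 1) 0 ++ (v - 1) :: rest := by
      rw [List.set_append]
      simp
    rw [hset1, show ((0 : Int)) = ((0 : Nat) : Int) by norm_num, PySem.List.pySetD_natCast]
    simp [List.replicate_succ]
  rw [hstep, borrow_done]

lemma join_nil_eq (l : List (List Char)) : PySem.Chars.join [] l = l.flatten := by
  induction l with
  | nil => simp [PySem.Chars.join_nil]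
  | cons p t ih =>
    cases t with
    | nil => simp [PySem.Chars.join_singleton]
    | cons q rest => rw [PySem.Chars.join_cons_cons]; simp [List.flatten] at ih ⊢; simp [ih]

lemma toChars_digit (d : Int) (h0 : 0 ≤ d) (h9 : d ≤ 9) :
    PySem.Int.toChars d = [Char.ofNat (48 + d.toNat)] := by
  interval_cases d <;> decide

lemma flat_rep (k : Nat) (d : Int) (h0 : 0 ≤ d) (h9 : d ≤ 9) :
    ((List.replicate k d).map PySem.Int.toChars).flatten = List.replicate k (Char.ofNat (48 + d.toNat)) := by
  simp [toChars_digit d h0 h9]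

lemma flat9 (k : Nat) :
    ((List.replicate k (9 : Int)).map PySem.Int.toChars).flatten = List.replicate k '9' := by
  rw [flat_rep k 9 (by norm_num) (by norm_num)]
  rfl

lemma flat0 (k : Nat) :
    ((List.replicate k (0 : Int)).map PySem.Int.toChars).flatten = List.replicate k '0' := by
  rw [flat_rep k 0 (by norm_num) (by norm_num)]
  rfl

lemma flat9' (k : Nat) :
    (List.replicate k (PySem.Int.toChars 9)).flatten = List.replicate k '9' := by
  simpa [List.map_replicate] using flat9 k

lemma flat0' (k : Nat) :
    (List.replicate k (PySem.Int.toChars 0)).flatten = List.replicate k '0' := by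
  simpa [List.map_replicate] using flat0 k

lemma replicate_shift {α : Type} (k : Nat) (a : α) (l : List α) :
    List.replicate k a ++ a :: l = a :: (List.replicate k a ++ l) := by
  induction k with
  | zero => rfl
  | succ k ih => simp [List.replicate_succ, ih]

lemma main_eq (n s : Int) (hn : 1 ≤ n) (hs : 1 ≤ s) (h9 : s ≤ 9 * n) :
    find n s = find_alt n s := by
  obtain ⟨m, rfl⟩ : ∃ m : Nat, n = (m : Int) := ⟨n.toNat, by omega⟩
  have hm : 1 ≤ m := by omega
  obtain ⟨q, r, hsqr, hr⟩ : ∃ q r : Nat, s = 9 * q + r ∧ r < 9 :=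
    ⟨(s / 9).toNat, (s % 9).toNat, by omega, by omega⟩
  have hqm : q ≤ m := by omega
  have g1 : ¬(s = 0) := by omega
  have g2 : ¬(s > 9 * (m : Int)) := by omega
  have g3 : ¬(s < 0 ∨ s > 9 * (m : Int)) := by
    push Not
    omega
  unfold find find_alt
  rw [if_neg g1, if_neg g2, if_neg g1, if_neg g3]
  dsimp only [Int.toNat_natCast]
  have hmini0 : ((PySem.List.pyRange ((m : Int) - 1) (-1) (-1)).foldl fillStep
      (List.replicate m 0, s)).1 = (gpair m s).1.reverse := by
    have h := mini_loop m [] s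
    rw [List.append_nil] at h
    rw [h, List.append_nil]
  have hmaxi : ((PySem.List.pyRange 0 (m : Int) 1).foldl fillStep
      (List.replicate m 0, s)).1 = (gpair m s).1 := by
    have h := maxi_loop m [] s
    simp only [List.nil_append, List.length_nil, Nat.cast_zero, zero_add] at h
    rw [h]
  have hfd : PySem.Int.floordiv s 9 = (q : Int) := by
    rw [PySem.Int.floordiv_eq_ediv_of_pos (by norm_num)]
    omega
  have hmd : PySem.Int.mod s 9 = (r : Int) := by
    rw [PySem.Int.mod_eq_emod_of_pos (by norm_num)]
    omega
  have hG := gpair_eq m s q r hsqr hr (by omega)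
  rw [hmini0, hmaxi, hG, hfd, hmd]
  obtain ⟨m', rfl⟩ : ∃ m', m = m' + 1 := ⟨m - 1, by omega⟩
  by_cases hbig : 9 * (((m' + 1 : Nat) : Int) - 1) + 2 ≤ s
  · -- forced first digit d0 = s - 9*(n-1) ≥ 2: both numbers are d0/r followed by all nines
    rw [max_eq_right (by omega)]
    have hfd2 : PySem.Int.floordiv (s - (s - 9 * (((m' + 1 : Nat) : Int) - 1))) 9 = (m' : Int) := by
      rw [PySem.Int.floordiv_eq_ediv_of_pos (by norm_num)]
      push_cast
      omega
    have hmd2 : PySem.Int.mod (s - (s - 9 * (((m' + 1 : Nat) : Int) - 1))) 9 = 0 := by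
      rw [PySem.Int.mod_eq_emod_of_pos (by norm_num)]
      push_cast
      omega
    rw [hfd2, hmd2]
    by_cases hr0 : r = 0
    · -- s = 9n: both strings are all nines
      have hqm' : q = m' + 1 := by omega
      subst hqm'
      subst hr0
      have hs9 : s - 9 * (((m' + 1 : Nat) : Int) - 1) = 9 := by push_cast at hsqr ⊢; omega
      rw [hs9]
      refine congrArg String.ofList ?_
      rw [if_neg ?h9ne]
      case h9ne =>
        simp only [ite_true, Nat.sub_self, List.append_nil, List.replicate_zero]
        rw [List.reverse_replicate, List.replicate_succ, PySem.List.pyGetD_zero_cons]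
        norm_num
      simp only [ite_true, ite_false, Nat.sub_self, List.append_nil, List.replicate_zero, List.reverse_replicate, ne_eq, not_true_eq_false]
      rw [show ((m' + 1 : Nat) : Int) - 1 - (m' : Int) - 0 = 0 by push_cast; ring]
      simp [join_nil_eq, PySem.List.pyRepeat_singleton, List.replicate_succ, show PySem.Int.toChars 9 = ['9'] from rfl]
    · -- r ≥ 1, so q = m' and the minimum needs no borrow: r followed by nines
      have hqm' : q = m' := by omega
      subst hqm'
      have hsr : s - 9 * (((q + 1 : Nat) : Int) - 1) = (r : Int) := by push_cast at hsqr ⊢; omega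
      rw [hsr]
      refine congrArg String.ofList ?_
      have hrne : (r : Int) ≠ 0 := by exact_mod_cast hr0
      rw [if_neg ?hrne2]
      case hrne2 =>
        simp only [if_neg hr0]
        rw [show q + 1 - q - 1 = 0 by omega]
        simp only [List.replicate_zero, List.append_nil, List.reverse_append,
          List.reverse_replicate, List.reverse_singleton, List.singleton_append,
          PySem.List.pyGetD_zero_cons]
        exact hrne
      simp only [if_neg hr0, if_pos hrne, ne_eq, not_true_eq_false, ite_false]
      rw [show q + 1 - q - 1 = 0 by omega,
        show ((q + 1 : Nat) : Int) - 1 - (q : Int) - 0 = 0 by push_cast; ring,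
        show ((q + 1 : Nat) : Int) - (q : Int) - 1 = 0 by push_cast; ring]
      simp [join_nil_eq, PySem.List.pyRepeat_singleton, show PySem.Int.toChars 9 = ['9'] from rfl]
  · -- d0 = 1: the minimum starts with 1; A reaches the same list via its borrow pass
    rw [max_eq_left (by omega)]
    by_cases hr0 : r = 0
    · -- r = 0: borrow decrements a nine (9 → 8)
      subst hr0
      have hq1 : 1 ≤ q := by omega
      obtain ⟨q', rfl⟩ : ∃ q', q = q' + 1 := ⟨q - 1, by omega⟩
      have hqm' : q' + 1 ≤ m' := by omega
      have hfd2 : PySem.Int.floordiv (s - 1) 9 = (q' : Int) := by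
        rw [PySem.Int.floordiv_eq_ediv_of_pos (by norm_num)]
        omega
      have hmd2 : PySem.Int.mod (s - 1) 9 = 8 := by
        rw [PySem.Int.mod_eq_emod_of_pos (by norm_num)]
        omega
      rw [hfd2, hmd2]
      simp only [ite_true, ite_false, ne_eq, not_true_eq_false, Nat.sub_zero, List.append_nil, List.reverse_append, List.reverse_replicate, if_pos (by norm_num : ((8:Int) ≠ 0)), Nat.cast_zero]
      rw [show List.replicate (q' + 1) (9 : Int) = 9 :: List.replicate q' 9 from rfl]
      rw [if_pos ?hz0]
      case hz0 =>
        rw [show m' + 1 - (q' + 1) = (m' - q' - 1) + 1 by omega, List.replicate_succ,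
          List.cons_append, PySem.List.pyGetD_zero_cons]
      rw [show m' + 1 - (q' + 1) = (m' - q' - 1) + 1 by omega]
      rw [show PySem.List.pyRange 1 ((m' + 1 : Nat) : Int) 1
            = PySem.List.pyRange 1 (((m' - q' - 1) + 1 : Nat) + 1 + (List.replicate q' (9:Int)).length) 1 by
          congr 1
          simp
          omega]
      rw [show (List.replicate ((m' - q' - 1) + 1) (0:Int) ++ 9 :: List.replicate q' 9)
            = (List.replicate ((m' - q' - 1) + 1) (0:Int) ++ (9:Int) :: List.replicate q' 9) from rfl,
        borrow_main ((m' - q' - 1) + 1) 9 (List.replicate q' 9) (by omega) (by norm_num)]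
      refine congrArg String.ofList ?_
      rw [show ((m' + 1 : Nat) : Int) - 1 - (q' : Int) - 1 = ((m' - q' - 1 : Nat) : Int) by push_cast; omega,
        show ((m' + 1 : Nat) : Int) - ((q' + 1 : Nat) : Int) - 0 = ((m' - q' : Nat) : Int) by push_cast; omega]
      rw [show m' - q' - 1 + 1 - 1 = m' - q' - 1 by omega]
      simp [join_nil_eq, PySem.List.pyRepeat_singleton, show (9:Int) - 1 = 8 from rfl, show PySem.Int.toChars 1 = ['1'] from rfl, show PySem.Int.toChars 8 = ['8'] from rfl, show PySem.Int.toChars 9 = ['9'] from rfl, show PySem.Int.toChars 0 = ['0'] from rfl, show m' - q' - 1 + 1 = m' - q' by omega, List.replicate_succ]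
    · -- r ≥ 1: the minimum is 1, zeros, then r-1 (dropped when r = 1) and nines
      have hqm'' : q ≤ m' := by omega
      by_cases hr1 : r = 1
      · subst hr1
        have hfd2 : PySem.Int.floordiv (s - 1) 9 = (q : Int) := by
          rw [PySem.Int.floordiv_eq_ediv_of_pos (by norm_num)]
          omega
        have hmd2 : PySem.Int.mod (s - 1) 9 = 0 := by
          rw [PySem.Int.mod_eq_emod_of_pos (by norm_num)]
          omega
        rw [hfd2, hmd2]
        simp only [if_neg hr0, ite_false, ne_eq, not_true_eq_false, Nat.cast_one, List.reverse_append, List.reverse_replicate, List.reverse_singleton, List.singleton_append, if_pos (by norm_num : ((1:Int) ≠ 0))]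
        rw [show m' + 1 - q - 1 = m' - q by omega]
        by_cases hz : m' - q = 0
        · rw [hz]
          simp only [List.replicate_zero, List.nil_append]
          rw [if_neg (by rw [PySem.List.pyGetD_zero_cons]; norm_num)]
          refine congrArg String.ofList ?_
          rw [show ((m' + 1 : Nat) : Int) - 1 - (q : Int) - 0 = 0 by push_cast; omega,
            show ((m' + 1 : Nat) : Int) - (q : Int) - 1 = 0 by push_cast; omega]
          simp [join_nil_eq, flat9', PySem.List.pyRepeat_singleton,
            show PySem.Int.toChars 1 = ['1'] from rfl, List.map_replicate]
        · obtain ⟨z', hzq⟩ : ∃ z', m' - q = z' + 1 := ⟨m' - q - 1, by omega⟩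
          rw [hzq]
          rw [if_pos (by rw [List.replicate_succ, List.cons_append, PySem.List.pyGetD_zero_cons])]
          rw [show PySem.List.pyRange 1 ((m' + 1 : Nat) : Int) 1
                = PySem.List.pyRange 1 ((z' + 1 : Nat) + 1 + (List.replicate q (9:Int)).length) 1 by
              congr 1
              simp
              omega]
          rw [show (List.replicate (z' + 1) (0:Int) ++ (1:Int) :: List.replicate q 9)
                = (List.replicate (z' + 1) (0:Int) ++ (1:Int) :: List.replicate q 9) from rfl,
            borrow_main (z' + 1) 1 (List.replicate q 9) (by omega) (by norm_num)]
          refine congrArg String.ofList ?_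
          rw [show ((m' + 1 : Nat) : Int) - 1 - (q : Int) - 0 = ((z' + 1 : Nat) : Int) by push_cast; omega,
            show ((m' + 1 : Nat) : Int) - (q : Int) - 1 = ((z' + 1 : Nat) : Int) by push_cast; omega,
            show z' + 1 - 1 = z' by omega]
          simp [join_nil_eq, flat9', PySem.List.pyRepeat_singleton, show PySem.Int.toChars 1 = ['1'] from rfl, show PySem.Int.toChars 0 = ['0'] from rfl, List.map_replicate, List.replicate_succ, replicate_shift]
      · -- r ≥ 2
        have hr2 : 2 ≤ r := by omega
        have hq_lt : q < m' := by omega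
        have hfd2 : PySem.Int.floordiv (s - 1) 9 = (q : Int) := by
          rw [PySem.Int.floordiv_eq_ediv_of_pos (by norm_num)]
          omega
        have hmd2 : PySem.Int.mod (s - 1) 9 = (r : Int) - 1 := by
          rw [PySem.Int.mod_eq_emod_of_pos (by norm_num)]
          omega
        rw [hfd2, hmd2]
        simp only [if_neg hr0, ne_eq, List.reverse_append, List.reverse_replicate, List.reverse_singleton, List.singleton_append, if_pos (by omega : ((r : Int) - 1 ≠ 0)), if_pos (by omega : ((r : Int) ≠ 0))]
        rw [show m' + 1 - q - 1 = (m' - q - 1) + 1 by omega]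
        rw [if_pos (by rw [List.replicate_succ, List.cons_append, PySem.List.pyGetD_zero_cons])]
        rw [show PySem.List.pyRange 1 ((m' + 1 : Nat) : Int) 1
              = PySem.List.pyRange 1 (((m' - q - 1) + 1 : Nat) + 1 + (List.replicate q (9:Int)).length) 1 by
            congr 1
            simp
            omega]
        rw [borrow_main ((m' - q - 1) + 1) (r : Int) (List.replicate q 9) (by omega) (by omega)]
        refine congrArg String.ofList ?_
        rw [show ((m' + 1 : Nat) : Int) - 1 - (q : Int) - 1 = ((m' - q - 1 : Nat) : Int) by push_cast; omega,
          show ((m' + 1 : Nat) : Int) - (q : Int) - 1 = ((m' - q : Nat) : Int) by push_cast; omega,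
          show m' - q - 1 + 1 - 1 = m' - q - 1 by omega]
        simp [join_nil_eq, flat9', flat0', PySem.List.pyRepeat_singleton,
          show PySem.Int.toChars 1 = ['1'] from rfl, List.map_replicate,
          show m' - q - 1 + 1 = m' - q by omega]

-- ===== VERDICT (by name: the statement is the Claim_ definition above) =====
theorem find_spec : Claim_unchanged_find := by
  intro n s hdom hpre hnd
  by_cases hs0 : s = 0
  · unfold find find_alt
    rw [if_pos hs0, if_pos hs0]
  by_cases hbig : 9 * n < s
  · unfold find find_alt
    rw [if_neg hs0, if_pos hbig, if_neg hs0, if_pos (Or.inr hbig)]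
  by_cases hneg : s < 0
  · have hn1 : n = 1 ∧ s = -1 := by
      unfold Pre_find at hpre
      unfold D_find at hnd
      omega
    obtain ⟨rfl, rfl⟩ := hn1
    decide
  · exact main_eq n s (by unfold Pre_find at hpre; omega) (by omega) (by omega)

theorem find_changed : Claim_changed_find := by
  unfold Claim_changed_find; decide
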